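-- pv_equiv track=rewrite | github.com/scikit-hep/awkward | dev/pytocuda.py | getctype
-- ===== SOURCE A (Python) =====
-- def getctype(typename):
--     pointercount = 0
--     while "List[" in typename:
--         typename = typename[5:]
--         typename = typename[:-1]
--         pointercount += 1
--     cpptype = typename + "*" * pointercount
--     return cpptype
-- ===== SOURCE B (Python) =====
-- def getctype(typename):
--     # Compute the nesting count k arithmetically: peeling [5:-1] k times from the
--     # original string is the slice typename[5*k : len(typename)-k].  Find the first
--     # k where that window no longer contains "List[", then slice once and add stars.
--     n = len(typename)
--     k = 0
--     while "List[" in typename[5 * k : n - k]: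
--         k += 1
--     return typename[5 * k : n - k] + "*" * k
-- ===== Notes on version B (the rewrite author's own statement) =====
-- stated objective: alternative
-- what changed: Instead of destructively peeling typename[5:][:-1] with a pointer counter, B never mutates the string: it computes the peel count k by arithmetic on slice indices of the original string (the k-th peeled string is typename[5*k : n-k]), then takes one final slice and appends k stars.
import Mathlib
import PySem

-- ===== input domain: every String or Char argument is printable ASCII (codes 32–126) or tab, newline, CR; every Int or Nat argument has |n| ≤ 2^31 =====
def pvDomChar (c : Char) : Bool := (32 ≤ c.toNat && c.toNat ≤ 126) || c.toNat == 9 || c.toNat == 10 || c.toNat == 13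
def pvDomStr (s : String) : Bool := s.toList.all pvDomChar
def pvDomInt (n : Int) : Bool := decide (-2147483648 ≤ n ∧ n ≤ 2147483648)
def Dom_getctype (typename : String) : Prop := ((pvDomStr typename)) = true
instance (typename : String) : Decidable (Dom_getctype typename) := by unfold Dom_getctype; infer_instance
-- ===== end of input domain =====

-- B replaces A's destructive peel-loop by index arithmetic on the ORIGINAL string:
-- it finds the first k for which typename[5*k : n-k] no longer contains "List[",
-- then slices once and appends k stars (objective: alternative decomposition).

-- length bound used by A's termination proof
theorem pvListBracket_len_le {t : List Char} (h : PySem.Chars.isIn ("List[".toList) t = true) :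
    5 ≤ t.length := by
  have hinf := (PySem.Chars.isIn_iff_infix _ _).mp h
  simpa using hinf.length_le

-- ===== PORT A =====
-- while "List[" in typename: typename = typename[5:]; typename = typename[:-1]; pointercount += 1
def getctypeGo (t : List Char) (pc : Nat) : List Char :=
  if h : PySem.Chars.isIn ("List[".toList) t = true then
    getctypeGo (PySem.List.slice (PySem.List.slice t (some 5) none) none (some (-1))) (pc + 1)
  else
    t ++ List.replicate pc '*'   -- cpptype = typename + "*" * pointercount
termination_by t.length
decreasing_by
  have h5 := pvListBracket_len_le h
  rw [show ((5 : Int)) = ((5 : Nat) : Int) by norm_num,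
      PySem.List.slice_from_natCast, PySem.List.slice_to_neg_one]
  simp [List.length_dropLast]
  omega

def getctype (typename : String) : String :=
  String.ofList (getctypeGo typename.toList 0)

-- ===== PORT B =====
-- n = len(typename); k = 0; while "List[" in typename[5*k : n-k]: k += 1
-- return typename[5*k : n-k] + "*" * k
def getctypeAltGo (t : List Char) (n : Nat) (k : Nat) : List Char :=
  if h : PySem.Chars.isIn ("List[".toList)
           (PySem.List.slice t (some ((5 * k : Nat) : Int)) (some ((n : Int) - (k : Int)))) = true then
    getctypeAltGo t n (k + 1)
  else
    PySem.List.slice t (some ((5 * k : Nat) : Int)) (some ((n : Int) - (k : Int)))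
      ++ List.replicate k '*'
termination_by t.length + n - k
decreasing_by
  have h5 := pvListBracket_len_le h
  have hlen := PySem.List.length_slice t ((5 * k : Nat) : Int) ((n : Int) - (k : Int))
  have hc1 := PySem.List.clampIdx_le t.length ((n : Int) - (k : Int))
  have hc2 : PySem.List.clampIdx t.length ((5 * k : Nat) : Int) = min (5 * k) t.length :=
    PySem.List.clampIdx_natCast _ _
  omega

def getctype_alt (typename : String) : String :=
  String.ofList (getctypeAltGo typename.toList typename.toList.length 0)

-- ===== PRECONDITION & SPEC =====
def Spec_getctype (typename : String) (out : String) : Prop := out = getctype_alt typename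
instance (typename : String) (out : String) : Decidable (Spec_getctype typename out) := by unfold Spec_getctype; infer_instance

-- ===== CLAIM (what is proved, stated in full; the proofs are below) =====
def Claim_equal_getctype : Prop := ∀ (typename : String), Dom_getctype typename → Spec_getctype typename (getctype typename)

-- ===== LEMMAS AND PROOFS =====

-- general list facts used by the window lemmas
theorem pvDropLast_drop (l : List Char) (a : Nat) : (l.drop a).dropLast = (l.dropLast).drop a := by
  rw [List.dropLast_eq_take, List.dropLast_eq_take, List.drop_take]
  congr 1
  simp [List.length_drop]
  omega

theorem pvDropLast_take (l : List Char) (n : Nat) (h : n ≤ l.length) :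
    (l.take n).dropLast = l.take (n - 1) := by
  rw [List.dropLast_eq_take, List.take_take]
  simp [List.length_take]
  omega

-- B's window typename[5k : n-k] as take/drop, for k ≤ n (n = length)
def pvWin (t : List Char) (k : Nat) : List Char := ((t.take (t.length - k)).drop (5 * k))

theorem pvWin_eq_slice (t : List Char) (k : Nat) (hk : k ≤ t.length) :
    PySem.List.slice t (some ((5 * k : Nat) : Int)) (some ((t.length : Int) - (k : Int)))
      = pvWin t k := by
  have hcast : ((t.length : Int) - (k : Int)) = (((t.length - k : Nat)) : Int) := by omega
  rw [hcast, PySem.List.slice_natCast]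
  unfold pvWin
  rw [List.drop_take]

theorem pvWin_zero (t : List Char) : pvWin t 0 = t := by
  simp [pvWin]

-- window length, needed to know the loop counter stays below the length
theorem pvWin_length (t : List Char) (k : Nat) : (pvWin t k).length = t.length - k - 5 * k := by
  simp [pvWin]

-- one peel t[5:][:-1] of the k-th window is the (k+1)-st window
theorem pvPeel_win (t : List Char) (k : Nat) :
    PySem.List.slice (PySem.List.slice (pvWin t k) (some 5) none) none (some (-1))
      = pvWin t (k + 1) := by
  rw [show ((5 : Int)) = ((5 : Nat) : Int) by norm_num,
      PySem.List.slice_from_natCast, PySem.List.slice_to_neg_one]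
  unfold pvWin
  rw [List.drop_drop, pvDropLast_drop, pvDropLast_take t _ (by omega)]
  rw [show 5 * k + 5 = 5 * (k + 1) from by ring,
      show t.length - k - 1 = t.length - (k + 1) from by omega]

-- loop ≡ loop: A's running string at counter k is B's k-th window of the original
theorem pvGo_eq (t : List Char) (k : Nat) (hk : k ≤ t.length) :
    getctypeGo (pvWin t k) k = getctypeAltGo t t.length k := by
  rw [getctypeGo, getctypeAltGo, pvWin_eq_slice t k hk]
  by_cases h : PySem.Chars.isIn ("List[".toList) (pvWin t k) = true
  · rw [dif_pos h, dif_pos h]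
    have h5 := pvListBracket_len_le h
    have hlen := pvWin_length t k
    rw [pvPeel_win t k]
    exact pvGo_eq t (k + 1) (by omega)
  · rw [dif_neg h, dif_neg h]
termination_by t.length - k
decreasing_by omega

-- ===== VERDICT (by name: the statement is the Claim_ definition above) =====
theorem getctype_spec : Claim_equal_getctype := by
  intro typename _
  unfold Spec_getctype getctype getctype_alt
  have h := pvGo_eq typename.toList 0 (Nat.zero_le _)
  rw [pvWin_zero] at h
  rw [h]
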